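-- pv_equiv track=rewrite | github.com/daimrod/opinion-sentence-annotator | utils.py | opinion_lexicon_to_graph
-- ===== SOURCE A (Python) =====
-- def invert_dict_nonunique(d):
--     newdict = {}
--     for k in d:
--         newdict.setdefault(d[k], []).append(k)
--     return newdict
--
-- def opinion_lexicon_to_graph(lexicon):
--     """Return a undirected graph from lexicon.
--
-- LEXICON is an opinion lexicon where each key is a class and the value
-- associated to it is a list of words that belongs to the class.
--
-- This function will build a undirected graph where each node are words
-- and the edges between nodes represent a similarity relationship. There
-- will be an edge between two words if they belong to the same class.
--
-- In practice, this method returns a dictionnary where a key is a word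
-- of LEXICON and the value associated to it are all words from the same
-- class.
--
-- This is intended to be used by emb.build_custom3
-- """
--     ret = {}
--     lexicon_inv = invert_dict_nonunique(lexicon)
--     for c in lexicon_inv:
--         words = lexicon_inv[c]
--         for word in words:
--             ret[word] = words
--     return ret
-- ===== SOURCE B (Python) =====
-- def opinion_lexicon_to_graph(lexicon):
--     """Return a undirected graph from lexicon (word -> class mapping).
--
--     Group the words by class in one comprehension over the distinct
--     classes, then flatten: each word maps to its whole class group.
--     """
--     groups = {c: [w for w, c2 in lexicon.items() if c2 == c]
--               for c in dict.fromkeys(lexicon.values())}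
--     return {w: words for words in groups.values() for w in words}
-- ===== Notes on version B (the rewrite author's own statement) =====
-- stated objective: simpler
-- what changed: A mutates an inverted dict via setdefault/append and then fills the result with a second nested assignment loop; B declaratively builds the class->words grouping with one dict comprehension over the distinct classes and flattens it with a second comprehension, no in-place mutation.
import Mathlib
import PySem

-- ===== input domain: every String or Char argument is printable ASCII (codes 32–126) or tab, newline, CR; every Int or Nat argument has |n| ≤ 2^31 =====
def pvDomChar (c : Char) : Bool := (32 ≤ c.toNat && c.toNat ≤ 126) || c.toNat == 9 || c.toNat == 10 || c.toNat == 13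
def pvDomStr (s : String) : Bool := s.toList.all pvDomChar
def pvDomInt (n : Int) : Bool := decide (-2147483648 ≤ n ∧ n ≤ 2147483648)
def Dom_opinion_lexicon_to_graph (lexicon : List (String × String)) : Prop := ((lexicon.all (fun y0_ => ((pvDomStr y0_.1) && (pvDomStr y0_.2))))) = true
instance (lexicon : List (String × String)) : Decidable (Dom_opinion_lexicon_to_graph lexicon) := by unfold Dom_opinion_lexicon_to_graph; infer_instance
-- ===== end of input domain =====

-- B replaces A's setdefault/append inversion plus second nested assignment loop by two
-- comprehensions (group by class, then flatten); objective: simpler, same return value.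

-- ===== PORT A =====
-- 'for k in d: newdict.setdefault(d[k], []).append(k)' — iterating the dict's items gives
-- exactly (k, d[k]); setdefault(c, []).append(k) is Dict.modify … c [] (· ++ [k]).
def invert_dict_nonunique (d : List (String × String)) : PySem.Dict String (List String) :=
  d.foldl (fun newdict p => PySem.Dict.modify newdict p.2 [] (fun ws => ws ++ [p.1])) PySem.Dict.empty

def opinion_lexicon_to_graph (lexicon : List (String × String)) : List (String × List String) :=
  let lexicon_inv := invert_dict_nonunique lexicon
  (lexicon_inv.items.foldl
      (fun ret q => q.2.foldl (fun ret word => ret.insert word q.2) ret)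
      (PySem.Dict.empty : PySem.Dict String (List String))).items

-- ===== PORT B =====
-- groups = {c: [w for w, c2 in lexicon.items() if c2 == c] for c in dict.fromkeys(lexicon.values())}
-- return {w: words for words in groups.values() for w in words}
-- (each dict comprehension inserts its pairs in order = PySem.Dict.ofList)
def opinion_lexicon_to_graph_alt (lexicon : List (String × String)) : List (String × List String) :=
  let groups : PySem.Dict String (List String) :=
    PySem.Dict.ofList ((PySem.List.dedup (lexicon.map Prod.snd)).map
      (fun c => (c, (lexicon.filter (fun p => p.2 == c)).map Prod.fst)))
  (PySem.Dict.ofList (groups.values.flatMap (fun words => words.map (fun w => (w, words))))).items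

-- ===== PRECONDITION & SPEC =====
def Spec_opinion_lexicon_to_graph (lexicon : List (String × String)) (out : List (String × List String)) : Prop := out = opinion_lexicon_to_graph_alt lexicon
instance (lexicon : List (String × String)) (out : List (String × List String)) : Decidable (Spec_opinion_lexicon_to_graph lexicon out) := by unfold Spec_opinion_lexicon_to_graph; infer_instance

-- ===== CLAIM (what is proved, stated in full; the proofs are below) =====
def Claim_equal_opinion_lexicon_to_graph : Prop := ∀ (lexicon : List (String × String)), Dom_opinion_lexicon_to_graph lexicon → Spec_opinion_lexicon_to_graph lexicon (opinion_lexicon_to_graph lexicon)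

-- ===== LEMMAS AND PROOFS =====

-- get? of a dict whose items are keyed by a list L
theorem pv_get?_map (L : List String) (g : String → List String) (c : String) :
    PySem.Dict.get? (⟨L.map (fun x => (x, g x))⟩ : PySem.Dict String (List String)) c
      = if c ∈ L then some (g c) else none := by
  induction L with
  | nil => simp [PySem.Dict.get?]
  | cons a t ih =>
      by_cases h : a = c
      · subst h; simp [PySem.Dict.get?]
      · simp only [PySem.Dict.get?, List.map_cons, List.find?_cons] at *
        have hb : ((a, g a).1 == c) = false := by simp [h]
        rw [hb]
        simpa [show ¬ c = a from fun hh => h hh.symm] using ih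

theorem pv_contains_map (L : List String) (g : String → List String) (c : String) :
    PySem.Dict.contains (⟨L.map (fun x => (x, g x))⟩ : PySem.Dict String (List String)) c
      = decide (c ∈ L) := by
  induction L with
  | nil => simp [PySem.Dict.contains]
  | cons a t ih =>
      by_cases h : a = c
      · subst h; simp [PySem.Dict.contains]
      · simp only [PySem.Dict.contains, List.map_cons, List.any_cons] at *
        simp [h, ih, Ne.symm h]

theorem pv_insert_map_of_mem (L : List String) (g : String → List String) (c : String)
    (v : List String) (hc : c ∈ L) :
    (PySem.Dict.insert (⟨L.map (fun x => (x, g x))⟩ : PySem.Dict String (List String)) c v).items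
      = L.map (fun x => (x, if x = c then v else g x)) := by
  rw [PySem.Dict.insert]
  rw [pv_contains_map]
  simp only [hc, decide_true, if_true, List.map_map]
  refine List.map_congr_left (fun x _ => ?_)
  by_cases h : x = c
  · subst h; simp
  · simp [h]

theorem pv_insert_map_of_not_mem (L : List String) (g : String → List String) (c : String)
    (v : List String) (hc : c ∉ L) :
    (PySem.Dict.insert (⟨L.map (fun x => (x, g x))⟩ : PySem.Dict String (List String)) c v).items
      = L.map (fun x => (x, g x)) ++ [(c, v)] := by
  rw [PySem.Dict.insert]
  rw [pv_contains_map]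
  simp [hc]

theorem pv_filter_nil (xs : List (String × String)) (c : String)
    (h : c ∉ xs.map Prod.snd) : xs.filter (fun p => p.2 == c) = [] := by
  rw [List.filter_eq_nil_iff]
  intro p hp
  simp only [beq_iff_eq]
  intro hpc
  exact h (List.mem_map.mpr ⟨p, hp, hpc⟩)

-- A's inverted dict, characterised: keys are the distinct classes in first-appearance
-- order, each carrying the words of that class in lexicon order.
theorem pv_inv_items (xs : List (String × String)) :
    (invert_dict_nonunique xs).items
      = (PySem.List.dedup (xs.map Prod.snd)).map
          (fun c => (c, (xs.filter (fun p => p.2 == c)).map Prod.fst)) := by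
  induction xs using List.reverseRecOn with
  | nil => rfl
  | append_singleton xs p ih =>
      have hD : invert_dict_nonunique xs
          = (⟨(PySem.List.dedup (xs.map Prod.snd)).map
              (fun c => (c, (xs.filter (fun q => q.2 == c)).map Prod.fst))⟩ :
              PySem.Dict String (List String)) := by
        rw [← ih]
      rw [invert_dict_nonunique, List.foldl_append, List.foldl_cons, List.foldl_nil,
        ← invert_dict_nonunique, hD]
      rw [PySem.Dict.modify, PySem.Dict.getD, pv_get?_map]
      have hded : PySem.List.dedup ((xs ++ [p]).map Prod.snd)
          = PySem.Set.add (PySem.List.dedup (xs.map Prod.snd)) p.2 := by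
        simp [PySem.List.dedup_eq_ofList, PySem.Set.ofList_append_singleton]
      by_cases hm : p.2 ∈ PySem.List.dedup (xs.map Prod.snd)
      · rw [if_pos hm, Option.getD_some]
        rw [pv_insert_map_of_mem _ _ _ _ hm, hded, PySem.Set.add_of_mem hm]
        refine List.map_congr_left (fun c _ => ?_)
        by_cases h : c = p.2
        · subst h; simp [List.filter_append]
        · simp [List.filter_append, Ne.symm h, h]
      · rw [if_neg hm, Option.getD_none]
        rw [pv_insert_map_of_not_mem _ _ _ _ hm, hded, PySem.Set.add_of_not_mem hm]
        have hm' : p.2 ∉ xs.map Prod.snd := by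
          rw [PySem.List.dedup_eq_ofList] at hm
          exact fun h => hm ((PySem.Set.mem_ofList _ _).mpr h)
        rw [List.map_append]
        congr 1
        · refine List.map_congr_left (fun c hc => ?_)
          have hcne : p.2 ≠ c := by
            rw [PySem.List.dedup_eq_ofList] at hc
            intro h; exact hm' (h ▸ (PySem.Set.mem_ofList _ _).mp hc)
          simp [List.filter_append, hcne]
        · simp [List.filter_append, pv_filter_nil xs p.2 hm']

-- A's second (nested) loop is the ofList of the flattened (word, words) pairs.
theorem pv_ret_eq (items : List (String × List String)) :
    items.foldl (fun ret q => q.2.foldl (fun ret word => ret.insert word q.2) ret)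
        (PySem.Dict.empty : PySem.Dict String (List String))
      = PySem.Dict.ofList (items.flatMap (fun q => q.2.map (fun w => (w, q.2)))) := by
  rw [PySem.Dict.ofList, PySem.Dict.update, List.foldl_flatMap]
  congr 1
  funext r q
  rw [List.foldl_map]

-- a dict comprehension over distinct keys lists exactly its pairs
theorem pv_ofList_map_items (L : List String) (g : String → List String) (hL : L.Nodup) :
    (PySem.Dict.ofList (L.map (fun c => (c, g c)))).items = L.map (fun c => (c, g c)) := by
  induction L using List.reverseRecOn with
  | nil => rfl
  | append_singleton t c ih =>
      have hnd : t.Nodup := (List.nodup_append.mp hL).1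
      have hc : c ∉ t := by
        intro h
        rw [List.nodup_append] at hL
        exact hL.2.2 c h c (List.mem_singleton_self c) rfl
      have hstep : PySem.Dict.ofList ((t ++ [c]).map (fun x => (x, g x)))
          = PySem.Dict.insert (PySem.Dict.ofList (t.map (fun x => (x, g x)))) c (g c) := by
        rw [PySem.Dict.ofList, PySem.Dict.ofList, PySem.Dict.update, PySem.Dict.update,
          List.map_append, List.foldl_append]
        rfl
      have hD : PySem.Dict.ofList (t.map (fun x => (x, g x)))
          = (⟨t.map (fun x => (x, g x))⟩ : PySem.Dict String (List String)) := by
        conv_rhs => rw [← ih hnd]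
      rw [hstep, hD, pv_insert_map_of_not_mem _ _ _ _ hc]
      simp

-- ===== VERDICT (by name: the statement is the Claim_ definition above) =====
theorem opinion_lexicon_to_graph_spec : Claim_equal_opinion_lexicon_to_graph := by
  intro lexicon _
  show _ = _
  rw [opinion_lexicon_to_graph, opinion_lexicon_to_graph_alt]
  have hnd : (PySem.List.dedup (lexicon.map Prod.snd)).Nodup := by
    rw [PySem.List.dedup_eq_ofList]; exact PySem.Set.nodup_ofList _
  rw [pv_inv_items, pv_ret_eq, PySem.Dict.values, pv_ofList_map_items _ _ hnd]
  rw [List.map_map, List.flatMap_map, List.flatMap_map]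
  simp [Function.comp]
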